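-- pv_equiv track=rewrite | github.com/onyuki/1400-zadach-po-programmirivaniu | 7.162-7.181.py | chain_flexible_orientation
-- ===== SOURCE A (Python) =====
-- def valid_tiles(seq):
--     i = 0
--     n = len(seq)
--     while i < n:
--         x = seq[i]
--         if not (0 <= x <= 66):
--             return False
--         a = x // 10
--         b = x % 10
--         if not (0 <= a <= 6 and 0 <= b <= 6):
--             return False
--         i += 1
--     return True
--
-- def chain_flexible_orientation(seq):
--     if not valid_tiles(seq):
--         return False
--     n = len(seq)
--     if n == 0:
--         return True
--     starts = set()
--     first = seq[0]
--     starts.add(first % 10)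
--     starts.add(first // 10)
--     for start_right in starts:
--         ok = True
--         current_right = start_right
--         i = 1
--         while i < n:
--             a = seq[i] // 10
--             b = seq[i] % 10
--             if a == current_right:
--                 current_right = b
--             elif b == current_right:
--                 current_right = a
--             else:
--                 ok = False
--                 break
--             i += 1
--         if ok:
--             return True
--     return False
-- ===== SOURCE B (Python) =====
-- def chain_flexible_orientation(seq):
--     if not all(0 <= x <= 66 and 0 <= x // 10 <= 6 and 0 <= x % 10 <= 6 for x in seq):
--         return False
--     if not seq:
--         return True
--     possible = {seq[0] // 10, seq[0] % 10}
--     for x in seq[1:]: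
--         a, b = divmod(x, 10)
--         nxt = set()
--         for r in possible:
--             if a == r:
--                 nxt.add(b)
--             elif b == r:
--                 nxt.add(a)
--         if not nxt:
--             return False
--         possible = nxt
--     return True
-- ===== Notes on version B (the rewrite author's own statement) =====
-- stated objective: alternative
-- what changed: Replaces the two-pass 'try each of the two possible start orientations with its own scalar scan' by a single forward pass maintaining a frontier set of all candidate current-right values, failing as soon as the frontier empties.
import Mathlib
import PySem

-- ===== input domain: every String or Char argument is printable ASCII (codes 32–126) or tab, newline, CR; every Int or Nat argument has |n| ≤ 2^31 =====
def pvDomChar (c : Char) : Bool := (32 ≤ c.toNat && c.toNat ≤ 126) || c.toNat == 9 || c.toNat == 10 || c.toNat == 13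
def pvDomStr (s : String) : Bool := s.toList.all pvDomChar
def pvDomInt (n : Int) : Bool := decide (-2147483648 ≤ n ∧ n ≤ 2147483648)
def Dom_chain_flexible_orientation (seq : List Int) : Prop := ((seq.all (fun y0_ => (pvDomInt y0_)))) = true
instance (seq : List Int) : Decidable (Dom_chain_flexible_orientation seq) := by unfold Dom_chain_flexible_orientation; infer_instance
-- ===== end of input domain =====

-- B replaces A's two separate scalar scans (one per orientation of the first tile) by a
-- single forward pass maintaining a frontier set of candidate current-right values (objective: alternative).

-- ===== PORT A =====
-- valid_tiles: while-loop over the elements, transcribed as structural recursion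
def pvValidA : List Int → Bool
  | [] => true
  | x :: rest =>
    if 0 ≤ x ∧ x ≤ 66 then
      let a := PySem.Int.floordiv x 10
      let b := PySem.Int.mod x 10
      if 0 ≤ a ∧ a ≤ 6 ∧ 0 ≤ b ∧ b ≤ 6 then pvValidA rest else false
    else false

-- the inner while-loop of A for one start_right (ok/break transcribed as early false)
def pvRunA : List Int → Int → Bool
  | [], _ => true
  | x :: rest, r =>
    let a := PySem.Int.floordiv x 10
    let b := PySem.Int.mod x 10
    if a = r then pvRunA rest b
    else if b = r then pvRunA rest a
    else false

def chain_flexible_orientation (seq : List Int) : Bool :=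
  if !pvValidA seq then false
  else
    match seq with
    | [] => true
    | first :: rest =>
      -- for start_right in starts: return True on first ok (= any over the set's elements)
      let starts : PySem.Set Int :=
        PySem.Set.add (PySem.Set.add PySem.Set.empty (PySem.Int.mod first 10)) (PySem.Int.floordiv first 10)
      starts.any (fun startRight => pvRunA rest startRight)

-- ===== PORT B =====
-- inner 'for r in possible' loop: build nxt from the frontier
def pvStepB (a b : Int) (s : PySem.Set Int) (r : Int) : PySem.Set Int :=
  if a = r then PySem.Set.add s b
  else if b = r then PySem.Set.add s a
  else s

-- the 'for x in seq[1:]' loop with early False on an empty frontier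
def pvGoB : List Int → PySem.Set Int → Bool
  | [], _ => true
  | x :: rest, possible =>
    let a := PySem.Int.floordiv x 10
    let b := PySem.Int.mod x 10
    let nxt := possible.foldl (pvStepB a b) PySem.Set.empty
    if nxt.isEmpty then false else pvGoB rest nxt

def chain_flexible_orientation_alt (seq : List Int) : Bool :=
  if seq.all (fun x => decide (0 ≤ x ∧ x ≤ 66 ∧
      0 ≤ PySem.Int.floordiv x 10 ∧ PySem.Int.floordiv x 10 ≤ 6 ∧
      0 ≤ PySem.Int.mod x 10 ∧ PySem.Int.mod x 10 ≤ 6)) then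
    match seq with
    | [] => true
    | first :: rest =>
      pvGoB rest
        (PySem.Set.add (PySem.Set.add PySem.Set.empty (PySem.Int.floordiv first 10)) (PySem.Int.mod first 10))
  else false

-- ===== PRECONDITION & SPEC =====
def Spec_chain_flexible_orientation (seq : List Int) (out : Bool) : Prop := out = chain_flexible_orientation_alt seq
instance (seq : List Int) (out : Bool) : Decidable (Spec_chain_flexible_orientation seq out) := by unfold Spec_chain_flexible_orientation; infer_instance

-- ===== CLAIM (what is proved, stated in full; the proofs are below) =====
def Claim_equal_chain_flexible_orientation : Prop := ∀ (seq : List Int), Dom_chain_flexible_orientation seq → Spec_chain_flexible_orientation seq (chain_flexible_orientation seq)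

-- ===== LEMMAS AND PROOFS =====

-- the deterministic one-tile transition both programs implement
def pvStep1 (a b r : Int) : Option Int :=
  if a = r then some b else if b = r then some a else none

def pvScan : List Int → Int → Option Int
  | [], r => some r
  | x :: rest, r =>
    match pvStep1 (PySem.Int.floordiv x 10) (PySem.Int.mod x 10) r with
    | some r' => pvScan rest r'
    | none => none

theorem pvValidA_eq_all (seq : List Int) :
    pvValidA seq = seq.all (fun x => decide (0 ≤ x ∧ x ≤ 66 ∧
      0 ≤ PySem.Int.floordiv x 10 ∧ PySem.Int.floordiv x 10 ≤ 6 ∧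
      0 ≤ PySem.Int.mod x 10 ∧ PySem.Int.mod x 10 ≤ 6)) := by
  induction seq with
  | nil => rfl
  | cons x rest ih =>
    simp only [pvValidA, List.all_cons, ih]
    split_ifs with h1 h2 <;> simp_all

theorem pvRunA_eq_scan (tiles : List Int) (r : Int) :
    pvRunA tiles r = (pvScan tiles r).isSome := by
  induction tiles generalizing r with
  | nil => rfl
  | cons x rest ih =>
    simp only [pvRunA, pvScan, pvStep1]
    split_ifs <;> simp [ih]

theorem mem_foldl_pvStepB (a b : Int) (l : List Int) (s : PySem.Set Int) (r' : Int) :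
    r' ∈ l.foldl (pvStepB a b) s ↔ r' ∈ s ∨ ∃ r ∈ l, pvStep1 a b r = some r' := by
  induction l generalizing s with
  | nil => simp
  | cons y l ih =>
    simp only [List.foldl_cons, ih, pvStepB, pvStep1]
    split_ifs <;> simp_all [PySem.Set.mem_add] <;> tauto

theorem pvScan_cons (x : Int) (rest : List Int) (r : Int) :
    pvScan (x :: rest) r
      = (pvStep1 (PySem.Int.floordiv x 10) (PySem.Int.mod x 10) r).bind (fun r' => pvScan rest r') := by
  cases h : pvStep1 (PySem.Int.floordiv x 10) (PySem.Int.mod x 10) r <;> simp only [pvScan, h, Option.bind]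

theorem pvGoB_iff (rest : List Int) (possible : PySem.Set Int) (hne : possible ≠ []) :
    (pvGoB rest possible = true ↔ ∃ r ∈ possible, (pvScan rest r).isSome = true) := by
  induction rest generalizing possible with
  | nil =>
    obtain ⟨r, hr⟩ := List.exists_mem_of_ne_nil possible hne
    simp only [pvGoB, pvScan, Option.isSome_some, true_iff]
    exact ⟨r, hr, trivial⟩
  | cons x rest ih =>
    simp only [pvGoB]
    have hmem := fun r' => mem_foldl_pvStepB (PySem.Int.floordiv x 10) (PySem.Int.mod x 10)
      possible PySem.Set.empty r'
    by_cases hempty :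
        (List.foldl (pvStepB (PySem.Int.floordiv x 10) (PySem.Int.mod x 10)) PySem.Set.empty possible) = []
    · rw [if_pos (by simp only [List.isEmpty_iff]; exact hempty)]
      simp only [Bool.false_eq_true, false_iff]
      rintro ⟨r, hr, hsome⟩
      rw [pvScan_cons] at hsome
      cases hstep : pvStep1 (PySem.Int.floordiv x 10) (PySem.Int.mod x 10) r with
      | none => rw [hstep] at hsome; simp at hsome
      | some r' =>
        have : r' ∈ (List.foldl (pvStepB (PySem.Int.floordiv x 10) (PySem.Int.mod x 10)) PySem.Set.empty possible) := by
          rw [hmem r']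
          exact Or.inr ⟨r, hr, hstep⟩
        rw [hempty] at this; simp at this
    · rw [if_neg (by simp only [List.isEmpty_iff]; exact hempty)]
      rw [ih _ hempty]
      constructor
      · rintro ⟨r', hr', hsome⟩
        rw [hmem r'] at hr'
        rcases hr' with h | ⟨r, hr, hstep⟩
        · simp [PySem.Set.empty] at h
        · exact ⟨r, hr, by rw [pvScan_cons, hstep]; exact hsome⟩
      · rintro ⟨r, hr, hsome⟩
        rw [pvScan_cons] at hsome
        cases hstep : pvStep1 (PySem.Int.floordiv x 10) (PySem.Int.mod x 10) r with
        | none => rw [hstep] at hsome; simp at hsome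
        | some r' =>
          rw [hstep] at hsome
          exact ⟨r', (hmem r').mpr (Or.inr ⟨r, hr, hstep⟩), hsome⟩

-- ===== VERDICT (by name: the statement is the Claim_ definition above) =====
theorem chain_flexible_orientation_spec : Claim_equal_chain_flexible_orientation := by
  intro seq _
  unfold Spec_chain_flexible_orientation chain_flexible_orientation chain_flexible_orientation_alt
  rw [← pvValidA_eq_all]
  cases hv : pvValidA seq with
  | false => simp
  | true =>
    cases seq with
    | nil => simp
    | cons first rest =>
      simp only [Bool.not_true, Bool.false_eq_true, if_false, if_true]
      set f := PySem.Int.floordiv first 10 with hf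
      set m := PySem.Int.mod first 10 with hm
      have hne : (PySem.Set.add (PySem.Set.add PySem.Set.empty f) m : PySem.Set Int) ≠ [] := by
        simp only [PySem.Set.add, PySem.Set.empty]
        split_ifs <;> simp_all [PySem.Set.contains]
      rw [Bool.eq_iff_iff]
      rw [pvGoB_iff _ _ hne]
      simp only [List.any_eq_true, PySem.Set.mem_add, pvRunA_eq_scan]
      constructor
      · rintro ⟨s, hs, hrun⟩
        refine ⟨s, ?_, hrun⟩
        simp [PySem.Set.empty] at hs ⊢
        tauto
      · rintro ⟨r, hr, hscan⟩
        simp [PySem.Set.empty] at hr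
        exact ⟨r, by simp [PySem.Set.empty]; tauto, hscan⟩
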